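-- pv_equiv track=rewrite | github.com/yakimka/advent_of_code_2024 | day19/part1.py | compute
-- ===== SOURCE A (Python) =====
-- def compute(s: str) -> int:
--     lines = s.splitlines()
--     colors = lines[0].split(", ")
--     colors_by_letter = {}
--     for color in colors:
--         colors_by_letter.setdefault(color[0], []).append(color)
--
--     total = 0
--     for pattern in lines[2:]:
--         graph = construct_graph(pattern, colors_by_letter)
--         if has_path(graph, 0, len(pattern)):
--             total += 1
--
--     return total
--
-- def construct_graph(pattern: str, colors_by_letter: dict[str, list[str]]):
--     graph = {len(pattern): {}}
--     for i, stripe in enumerate(pattern):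
--         graph[i] = {}
--         for stripe_pattern in colors_by_letter.get(stripe, []):
--             next_node = i + len(stripe_pattern)
--             if stripe_pattern != pattern[i:next_node]:
--                 continue
--             graph[i][next_node] = 1
--
--     return graph
--
-- def has_path(graph: dict[int, dict[int, int]], start: int, end: int) -> bool:
--     visited = set()
--     stack = [start]
--     while stack:
--         node = stack.pop()
--         if node == end:
--             return True
--         if node in visited:
--             continue
--         visited.add(node)
--         stack.extend(graph.get(node, {}).keys())
--
--     return False
-- ===== SOURCE B (Python) =====
-- def compute(s: str) -> int:
--     lines = s.splitlines()
--     colors = lines[0].split(", ")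
--     colors_by_letter = {}
--     for color in colors:
--         colors_by_letter.setdefault(color[0], []).append(color)
--
--     total = 0
--     for pattern in lines[2:]:
--         n = len(pattern)
--         reachable = [False] * (n + 1)
--         reachable[0] = True
--         for i in range(n):
--             if reachable[i]:
--                 for strip in colors_by_letter.get(pattern[i], []):
--                     if pattern[i:i + len(strip)] == strip:
--                         reachable[i + len(strip)] = True
--         if reachable[n]:
--             total += 1
--     return total
-- ===== Notes on version B (the rewrite author's own statement) =====
-- stated objective: simpler
-- what changed: Replaces the per-pattern graph construction plus stack-based DFS with a single forward word-break DP over a boolean reachability array.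
-- outside the precondition, e.g. on compute(''): A raises IndexError, B raises IndexError; on compute('a, , b\n\nab'): A raises IndexError, B raises IndexError
import Mathlib
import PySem

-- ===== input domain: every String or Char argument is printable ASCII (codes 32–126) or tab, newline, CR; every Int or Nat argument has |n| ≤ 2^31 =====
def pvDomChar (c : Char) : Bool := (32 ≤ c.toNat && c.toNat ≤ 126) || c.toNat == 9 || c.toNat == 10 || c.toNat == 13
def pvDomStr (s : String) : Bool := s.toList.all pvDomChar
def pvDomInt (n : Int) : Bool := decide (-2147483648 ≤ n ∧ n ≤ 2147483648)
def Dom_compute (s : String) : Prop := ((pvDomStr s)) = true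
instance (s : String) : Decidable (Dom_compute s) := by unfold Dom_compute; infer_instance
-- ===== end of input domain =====

-- B replaces the per-pattern graph construction + stack DFS of A by a forward word-break DP
-- over a boolean reachability array (objective: simpler); same return value on all inputs in Pre_.

-- ===== PORT A =====
-- shared parsing helper: the colors_by_letter loop is literally the same code in Source A and Source B
def pvColorsByLetter (colors : List (List Char)) : PySem.Dict Char (List (List Char)) :=
  colors.foldl
    (fun d color => d.modify (PySem.List.pyGetD color 0 ' ') [] (fun l => l ++ [color]))
    PySem.Dict.empty

def pvConstructGraph (pattern : List Char) (cbl : PySem.Dict Char (List (List Char))) :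
    PySem.Dict Int (PySem.Dict Int Int) :=
  (PySem.List.enumerate pattern).foldl
    (fun g e =>
      (cbl.getD e.2 []).foldl
        (fun g2 sp =>
          if PySem.List.slice pattern (some e.1) (some (e.1 + PySem.List.len sp)) ≠ sp then g2
          else g2.modify e.1 PySem.Dict.empty
            (fun inner => inner.insert (e.1 + PySem.List.len sp) 1))
        (g.insert e.1 PySem.Dict.empty))
    (PySem.Dict.empty.insert (PySem.List.len pattern) PySem.Dict.empty)

-- termination bookkeeping for the DFS while-loop (measure only; the loop body is the transliteration)
def pvTargets (g : PySem.Dict Int (PySem.Dict Int Int)) : List Int :=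
  (g.values.map PySem.Dict.keys).flatten

def pvDfsMeasure (g : PySem.Dict Int (PySem.Dict Int Int))
    (visited : PySem.Set Int) (stack : List Int) : Nat :=
  ((stack ++ pvTargets g).toFinset \ visited.toFinset).card * ((pvTargets g).length + 1)
    + stack.length

lemma pvKeys_sub (g : PySem.Dict Int (PySem.Dict Int Int)) (node : Int) :
    ((g.getD node PySem.Dict.empty).keys).Sublist (pvTargets g) := by
  rw [PySem.Dict.getD_eq_get?_getD]
  cases h : g.get? node with
  | none => simp [PySem.Dict.keys_empty]
  | some row =>
    have hrow : row ∈ g.values := by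
      have := PySem.Dict.mem_items_of_get?_eq_some g h
      simp only [PySem.Dict.values]
      exact List.mem_map_of_mem this
    have : row.keys ∈ g.values.map PySem.Dict.keys := List.mem_map_of_mem hrow
    simpa using List.sublist_flatten_of_mem this

lemma pvMeasure_skip (g : PySem.Dict Int (PySem.Dict Int Int))
    (visited : PySem.Set Int) (stack : List Int) (h : stack ≠ []) :
    pvDfsMeasure g visited stack.dropLast < pvDfsMeasure g visited stack := by
  unfold pvDfsMeasure
  have hsub : ((stack.dropLast ++ pvTargets g).toFinset \ visited.toFinset) ⊆
      ((stack ++ pvTargets g).toFinset \ visited.toFinset) := by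
    intro x hx
    simp only [Finset.mem_sdiff, List.mem_toFinset, List.mem_append] at hx ⊢
    rcases hx with ⟨hx1, hx2⟩
    refine ⟨?_, hx2⟩
    rcases hx1 with h1 | h1
    · exact Or.inl ((List.dropLast_sublist _).subset h1)
    · exact Or.inr h1
  have hc := Finset.card_le_card hsub
  have hl : stack.dropLast.length = stack.length - 1 := by simp [List.length_dropLast]
  have hlen : 1 ≤ stack.length := List.length_pos_iff.mpr h
  have := Nat.mul_le_mul_right ((pvTargets g).length + 1) hc
  omega

lemma pvMeasure_visit (g : PySem.Dict Int (PySem.Dict Int Int))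
    (visited : PySem.Set Int) (stack : List Int) (h : stack ≠ [])
    (hnv : (stack.getLast h) ∉ visited) :
    pvDfsMeasure g (PySem.Set.add visited (stack.getLast h))
      (stack.dropLast ++ (g.getD (stack.getLast h) PySem.Dict.empty).keys)
      < pvDfsMeasure g visited stack := by
  unfold pvDfsMeasure
  set node := stack.getLast h with hnode
  set T := pvTargets g with hT
  set kr := (g.getD node PySem.Dict.empty).keys with hkr
  have hks := pvKeys_sub g node
  have hkl : kr.length ≤ T.length := hks.length_le
  have hkm : ∀ x ∈ kr, x ∈ T := fun x hx => hks.subset hx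
  set S := ((stack ++ T).toFinset \ visited.toFinset) with hS
  have hnodeS : node ∈ S := by
    simp only [hS, Finset.mem_sdiff, List.mem_toFinset, List.mem_append]
    exact ⟨Or.inl (List.getLast_mem h), hnv⟩
  have haddf : (PySem.Set.add visited node).toFinset = insert node visited.toFinset := by
    rw [PySem.Set.add_of_not_mem hnv]
    simp
  have hsub : ((stack.dropLast ++ kr ++ T).toFinset \ (PySem.Set.add visited node).toFinset) ⊆
      S.erase node := by
    intro x hx
    simp only [haddf, Finset.mem_sdiff, List.mem_toFinset, List.mem_append,
      Finset.mem_insert, not_or] at hx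
    rcases hx with ⟨hx1, hx2, hx3⟩
    simp only [Finset.mem_erase, hS, Finset.mem_sdiff, List.mem_toFinset, List.mem_append]
    refine ⟨hx2, ?_, hx3⟩
    rcases hx1 with (h1 | h1) | h1
    · exact Or.inl ((List.dropLast_sublist _).subset h1)
    · exact Or.inr (hkm x h1)
    · exact Or.inr h1
  have hc : ((stack.dropLast ++ kr ++ T).toFinset \ (PySem.Set.add visited node).toFinset).card
      ≤ S.card - 1 := by
    have := Finset.card_le_card hsub
    rw [Finset.card_erase_of_mem hnodeS] at this
    exact this
  have hpos : 1 ≤ S.card := Finset.card_pos.mpr ⟨node, hnodeS⟩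
  have hlen : 1 ≤ stack.length := List.length_pos_iff.mpr h
  have hdl : stack.dropLast.length = stack.length - 1 := by simp [List.length_dropLast]
  have hmul := Nat.mul_le_mul_right (T.length + 1) hc
  have hms : (S.card - 1) * (T.length + 1) + (T.length + 1) = S.card * (T.length + 1) := by
    have : S.card - 1 + 1 = S.card := by omega
    calc (S.card - 1) * (T.length + 1) + (T.length + 1)
        = (S.card - 1 + 1) * (T.length + 1) := by ring
      _ = S.card * (T.length + 1) := by rw [this]
  have hlap : (stack.dropLast ++ kr).length = stack.length - 1 + kr.length := by
    simp [hdl]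
  omega

def pvHasPathAux (graph : PySem.Dict Int (PySem.Dict Int Int)) (endN : Int)
    (visited : PySem.Set Int) (stack : List Int) : Bool :=
  if hst : stack = [] then false
  else
    let node := stack.getLast hst
    let rest := stack.dropLast
    if node = endN then true
    else if PySem.Set.contains visited node then
      pvHasPathAux graph endN visited rest
    else
      pvHasPathAux graph endN (PySem.Set.add visited node)
        (rest ++ (graph.getD node PySem.Dict.empty).keys)
termination_by pvDfsMeasure graph visited stack
decreasing_by
  · exact pvMeasure_skip graph visited stack hst
  · exact pvMeasure_visit graph visited stack hst
      (by simpa [PySem.Set.contains_iff] using ‹¬ PySem.Set.contains visited (stack.getLast hst) = true›)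

def pvHasPath (graph : PySem.Dict Int (PySem.Dict Int Int)) (start endN : Int) : Bool :=
  pvHasPathAux graph endN PySem.Set.empty [start]

def compute (s : String) : Int :=
  let lines := (PySem.Str.splitlines s).map String.toList
  let colors := PySem.Chars.splitOn (PySem.List.pyGetD lines 0 []) [',', ' ']
  let cbl := pvColorsByLetter colors
  (PySem.List.slice lines (some 2) none).foldl
    (fun total pattern =>
      if pvHasPath (pvConstructGraph pattern cbl) 0 (PySem.List.len pattern) then total + 1
      else total)
    0

-- ===== PORT B =====
def compute_alt (s : String) : Int :=
  let lines := (PySem.Str.splitlines s).map String.toList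
  let colors := PySem.Chars.splitOn (PySem.List.pyGetD lines 0 []) [',', ' ']
  let cbl := pvColorsByLetter colors
  (PySem.List.slice lines (some 2) none).foldl
    (fun total pattern =>
      let reach :=
        (PySem.List.pyRange 0 (PySem.List.len pattern) 1).foldl
          (fun r i =>
            if PySem.List.pyGetD r i false then
              (cbl.getD (PySem.List.pyGetD pattern i ' ') []).foldl
                (fun r2 strip =>
                  if PySem.List.slice pattern (some i) (some (i + PySem.List.len strip)) = strip
                  then PySem.List.pySetD r2 (i + PySem.List.len strip) true
                  else r2) r
            else r)
          (PySem.List.pySetD (List.replicate (pattern.length + 1) false) 0 true)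
      if PySem.List.pyGetD reach (PySem.List.len pattern) false then total + 1 else total)
    0

-- ===== PRECONDITION & SPEC =====
-- Pre_ excludes exactly the inputs where the Python A raises IndexError: the empty string
-- (lines[0]) and first lines whose ", "-split contains an empty piece (color[0]).
def Pre_compute (s : String) : Prop :=
  PySem.Str.splitlines s ≠ [] ∧
  ∀ c ∈ PySem.Chars.splitOn
      (PySem.List.pyGetD ((PySem.Str.splitlines s).map String.toList) 0 []) [',', ' '],
    c ≠ []
instance (s : String) : Decidable (Pre_compute s) := by unfold Pre_compute; infer_instance

def pvWitness_compute : String := "r, wr, b\n\nbr"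

def Spec_compute (s : String) (out : Int) : Prop := out = compute_alt s
instance (s : String) (out : Int) : Decidable (Spec_compute s out) := by
  unfold Spec_compute; infer_instance

-- ===== CLAIM (what is proved, stated in full; the proofs are below) =====
def Claim_equal_compute : Prop :=
  ∀ (s : String), Dom_compute s → Pre_compute s → Spec_compute s (compute s)

-- ===== LEMMAS AND PROOFS =====

-- the step relation of A's graph, read off the dict
def pvGStepRel (g : PySem.Dict Int (PySem.Dict Int Int)) (a b : Int) : Prop :=
  b ∈ (g.getD a PySem.Dict.empty).keys

-- the semantic step relation both programs implement
def pvStepR (pattern : List Char) (cbl : PySem.Dict Char (List (List Char))) (a b : Int) : Prop :=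
  0 ≤ a ∧ a < PySem.List.len pattern ∧
  ∃ sp ∈ cbl.getD (PySem.List.pyGetD pattern a ' ') [],
    PySem.List.slice pattern (some a) (some (a + PySem.List.len sp)) = sp ∧
    b = a + PySem.List.len sp

-- == DFS correctness ==
lemma pvSound (g : PySem.Dict Int (PySem.Dict Int Int)) (endN : Int)
    (visited : PySem.Set Int) (stack : List Int)
    (h : pvHasPathAux g endN visited stack = true) :
    ∃ v ∈ stack, Relation.ReflTransGen (pvGStepRel g) v endN := by
  fun_induction pvHasPathAux g endN visited stack
  case case1 => simp at h
  case case2 =>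
    rename_i visited stack hst node hend
    exact ⟨node, List.getLast_mem hst, hend ▸ Relation.ReflTransGen.refl⟩
  case case3 =>
    rename_i visited stack hst node rest hend hvis ih
    obtain ⟨v, hv, hr⟩ := ih h
    exact ⟨v, (List.dropLast_sublist _).subset hv, hr⟩
  case case4 =>
    rename_i visited stack hst node rest hend hvis ih
    obtain ⟨v, hv, hr⟩ := ih h
    rcases List.mem_append.mp hv with hv | hv
    · exact ⟨v, (List.dropLast_sublist _).subset hv, hr⟩
    · exact ⟨node, List.getLast_mem hst, Relation.ReflTransGen.head hv hr⟩

lemma pvEscape (g : PySem.Dict Int (PySem.Dict Int Int)) (endN : Int)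
    (visited : PySem.Set Int) (stack : List Int)
    (hI : ∀ u ∈ visited, ∀ w, pvGStepRel g u w → w ∈ visited ∨ w ∈ stack)
    (he : endN ∉ visited) (v : Int)
    (hr : Relation.ReflTransGen (pvGStepRel g) v endN) (hv : v ∈ visited) :
    ∃ w ∈ stack, w ∉ visited ∧ Relation.ReflTransGen (pvGStepRel g) w endN := by
  revert hv
  induction hr using Relation.ReflTransGen.head_induction_on with
  | refl => intro hv; exact absurd hv he
  | head hac hcb ih =>
    rename_i a c
    intro ha
    rcases hI a ha c hac with hc | hc
    · exact ih hc
    · by_cases hcv : c ∈ visited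
      · exact ih hcv
      · exact ⟨c, hc, hcv, hcb⟩

lemma pvComplete (g : PySem.Dict Int (PySem.Dict Int Int)) (endN : Int) :
    ∀ (fuel : Nat) (visited : PySem.Set Int) (stack : List Int),
      pvDfsMeasure g visited stack ≤ fuel →
      (∀ u ∈ visited, ∀ w, pvGStepRel g u w → w ∈ visited ∨ w ∈ stack) → endN ∉ visited →
      ∀ v ∈ stack, Relation.ReflTransGen (pvGStepRel g) v endN →
      pvHasPathAux g endN visited stack = true := by
  intro fuel
  induction fuel using Nat.strong_induction_on with
  | _ fuel ihf =>
    intro visited stack hm hI he v hv hr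
    rw [pvHasPathAux.eq_def]
    by_cases hst : stack = []
    · subst hst; simp at hv
    · rw [dif_neg hst]
      change (if stack.getLast hst = endN then true
        else if PySem.Set.contains visited (stack.getLast hst) then
          pvHasPathAux g endN visited stack.dropLast
        else pvHasPathAux g endN (PySem.Set.add visited (stack.getLast hst))
          (stack.dropLast ++ (g.getD (stack.getLast hst) PySem.Dict.empty).keys)) = true
      set node := stack.getLast hst with hnodedef
      have hdec : stack.dropLast ++ [node] = stack := List.dropLast_append_getLast hst
      by_cases hend : node = endN
      · rw [if_pos hend]
      · rw [if_neg hend]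
        by_cases hvis : PySem.Set.contains visited node
        · rw [if_pos hvis]
          have hnodev : node ∈ visited := (PySem.Set.contains_iff visited node).mp hvis
          have hI' : ∀ u ∈ visited, ∀ w, pvGStepRel g u w →
              w ∈ visited ∨ w ∈ stack.dropLast := by
            intro u hu w hw
            rcases hI u hu w hw with h1 | h1
            · exact Or.inl h1
            · rw [← hdec] at h1
              rcases List.mem_append.mp h1 with h2 | h2
              · exact Or.inr h2
              · simp only [List.mem_singleton] at h2
                exact Or.inl (h2 ▸ hnodev)
          have hlt := pvMeasure_skip g visited stack hst
          rw [← hdec] at hv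
          rcases List.mem_append.mp hv with hv1 | hv1
          · exact ihf _ (by omega) visited stack.dropLast le_rfl hI' he v hv1 hr
          · simp only [List.mem_singleton] at hv1
            obtain ⟨w, hw, hwnv, hwr⟩ :=
              pvEscape g endN visited stack.dropLast hI' he v hr (hv1 ▸ hnodev)
            exact ihf _ (by omega) visited stack.dropLast le_rfl hI' he w hw hwr
        · rw [if_neg hvis]
          have hnodev : node ∉ visited := by
            intro hmem
            exact hvis ((PySem.Set.contains_iff visited node).mpr hmem)
          have hI' : ∀ u ∈ PySem.Set.add visited node, ∀ w, pvGStepRel g u w →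
              w ∈ PySem.Set.add visited node ∨
              w ∈ stack.dropLast ++ (g.getD node PySem.Dict.empty).keys := by
            intro u hu w hw
            rcases (PySem.Set.mem_add _ _ _).mp hu with hu1 | hu1
            · rcases hI u hu1 w hw with h1 | h1
              · exact Or.inl ((PySem.Set.mem_add _ _ _).mpr (Or.inl h1))
              · rw [← hdec] at h1
                rcases List.mem_append.mp h1 with h2 | h2
                · exact Or.inr (List.mem_append.mpr (Or.inl h2))
                · simp only [List.mem_singleton] at h2
                  exact Or.inl ((PySem.Set.mem_add _ _ _).mpr (Or.inr h2))
            · subst hu1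
              exact Or.inr (List.mem_append.mpr (Or.inr hw))
          have he' : endN ∉ PySem.Set.add visited node := by
            intro hmem
            rcases (PySem.Set.mem_add _ _ _).mp hmem with h1 | h1
            · exact he h1
            · exact hend h1.symm
          have hlt := pvMeasure_visit g visited stack hst hnodev
          rw [← hnodedef] at hlt
          rw [← hdec] at hv
          rcases List.mem_append.mp hv with hv1 | hv1
          · exact ihf _ (by omega) _ _ le_rfl hI' he' v
              (List.mem_append.mpr (Or.inl hv1)) hr
          · simp only [List.mem_singleton] at hv1
            rw [hv1] at hr
            have hnmem : node ∈ PySem.Set.add visited node :=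
              (PySem.Set.mem_add _ _ _).mpr (Or.inr rfl)
            obtain ⟨w, hw, hwnv, hwr⟩ := pvEscape g endN (PySem.Set.add visited node)
              (stack.dropLast ++ (g.getD node PySem.Dict.empty).keys) hI' he' node hr hnmem
            exact ihf _ (by omega) _ _ le_rfl hI' he' w hw hwr

lemma pvHasPath_iff (g : PySem.Dict Int (PySem.Dict Int Int)) (start endN : Int) :
    pvHasPath g start endN = true ↔ Relation.ReflTransGen (pvGStepRel g) start endN := by
  constructor
  · intro h
    obtain ⟨v, hv, hr⟩ := pvSound g endN PySem.Set.empty [start] h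
    simp only [List.mem_singleton] at hv
    exact hv ▸ hr
  · intro h
    exact pvComplete g endN (pvDfsMeasure g PySem.Set.empty [start]) PySem.Set.empty [start]
      le_rfl (by intro u hu; simp [PySem.Set.empty] at hu) (by simp [PySem.Set.empty])
      start (by simp) h

-- == graph characterization ==
def pvRow (pattern : List Char) (cbl : PySem.Dict Char (List (List Char))) (i : Int) :
    PySem.Dict Int Int :=
  (cbl.getD (PySem.List.pyGetD pattern i ' ') []).foldl
    (fun d sp =>
      if PySem.List.slice pattern (some i) (some (i + PySem.List.len sp)) ≠ sp then d
      else d.insert (i + PySem.List.len sp) 1)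
    PySem.Dict.empty

lemma pvInner_getD (pattern : List Char) (i : Int) (l : List (List Char)) :
    ∀ (g : PySem.Dict Int (PySem.Dict Int Int)) (j : Int),
    (l.foldl
      (fun g2 sp =>
        if PySem.List.slice pattern (some i) (some (i + PySem.List.len sp)) ≠ sp then g2
        else g2.modify i PySem.Dict.empty
          (fun inner => inner.insert (i + PySem.List.len sp) 1))
      g).getD j PySem.Dict.empty =
    if j = i then
      l.foldl
        (fun d sp =>
          if PySem.List.slice pattern (some i) (some (i + PySem.List.len sp)) ≠ sp then d
          else d.insert (i + PySem.List.len sp) 1)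
        (g.getD i PySem.Dict.empty)
    else g.getD j PySem.Dict.empty := by
  induction l with
  | nil => intro g j; by_cases hj : j = i <;> simp [hj]
  | cons sp t ih =>
    intro g j
    simp only [List.foldl_cons]
    by_cases hc : PySem.List.slice pattern (some i) (some (i + PySem.List.len sp)) ≠ sp
    · rw [if_pos hc, if_pos hc, ih]
    · rw [if_neg hc, if_neg hc, ih]
      by_cases hj : j = i
      · rw [if_pos hj, if_pos hj]
        subst hj
        rw [PySem.Dict.getD_modify_self]
      · rw [if_neg hj, if_neg hj, PySem.Dict.getD_modify_of_ne _ _ _ hj]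

lemma pvOuter_getD (pattern : List Char) (cbl : PySem.Dict Char (List (List Char)))
    (init : PySem.Dict Int (PySem.Dict Int Int)) (k : Nat) (j : Int) :
    ((PySem.List.pyRange 0 (k : Int)).foldl
      (fun g e =>
        ((cbl.getD (PySem.List.pyGetD pattern e ' ') []).foldl
          (fun g2 sp =>
            if PySem.List.slice pattern (some e) (some (e + PySem.List.len sp)) ≠ sp then g2
            else g2.modify e PySem.Dict.empty
              (fun inner => inner.insert (e + PySem.List.len sp) 1))
          (g.insert e PySem.Dict.empty)))
      init).getD j PySem.Dict.empty =
    if 0 ≤ j ∧ j < (k : Int) then pvRow pattern cbl j else init.getD j PySem.Dict.empty := by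
  induction k with
  | zero =>
    rw [PySem.List.pyRange_one_eq_nil (by omega)]
    simp only [List.foldl_nil]
    rw [if_neg (by omega)]
  | succ k ih =>
    have hcast : ((k + 1 : Nat) : Int) = (k : Int) + 1 := by push_cast; ring
    rw [hcast, PySem.List.pyRange_one_succ_right (by positivity), List.foldl_append,
      List.foldl_cons, List.foldl_nil, pvInner_getD]
    by_cases hj : j = (k : Int)
    · rw [if_pos hj, if_pos (by omega)]
      rw [hj, PySem.Dict.getD_insert]
      rw [if_pos rfl]
      rfl
    · rw [if_neg hj, PySem.Dict.getD_insert, if_neg hj, ih]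
      by_cases hj2 : 0 ≤ j ∧ j < (k : Int)
      · rw [if_pos hj2, if_pos (by omega)]
      · rw [if_neg hj2, if_neg (by omega)]

lemma pvGraph_getD (pattern : List Char) (cbl : PySem.Dict Char (List (List Char))) (j : Int) :
    (pvConstructGraph pattern cbl).getD j PySem.Dict.empty =
      if 0 ≤ j ∧ j < PySem.List.len pattern then pvRow pattern cbl j
      else (PySem.Dict.empty.insert (PySem.List.len pattern) PySem.Dict.empty).getD j
        PySem.Dict.empty := by
  unfold pvConstructGraph
  rw [PySem.List.enumerate_eq_map_pyRange pattern ' ', List.foldl_map]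
  rw [PySem.List.len_eq]
  exact pvOuter_getD pattern cbl _ pattern.length j

lemma pvMemRow (pattern : List Char) (cbl : PySem.Dict Char (List (List Char))) (i j : Int) :
    j ∈ (pvRow pattern cbl i).keys ↔
      ∃ sp ∈ cbl.getD (PySem.List.pyGetD pattern i ' ') [],
        PySem.List.slice pattern (some i) (some (i + PySem.List.len sp)) = sp ∧
        j = i + PySem.List.len sp := by
  suffices haux : ∀ (l : List (List Char)) (d : PySem.Dict Int Int),
      j ∈ (l.foldl
        (fun d sp =>
          if PySem.List.slice pattern (some i) (some (i + PySem.List.len sp)) ≠ sp then d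
          else d.insert (i + PySem.List.len sp) 1)
        d).keys ↔
      j ∈ d.keys ∨ ∃ sp ∈ l,
        PySem.List.slice pattern (some i) (some (i + PySem.List.len sp)) = sp ∧
        j = i + PySem.List.len sp by
    have := haux (cbl.getD (PySem.List.pyGetD pattern i ' ') []) PySem.Dict.empty
    simpa [pvRow, PySem.Dict.keys_empty] using this
  intro l
  induction l with
  | nil => intro d; simp
  | cons sp t ih =>
    intro d
    simp only [List.foldl_cons]
    by_cases hc : PySem.List.slice pattern (some i) (some (i + PySem.List.len sp)) ≠ sp
    · rw [if_pos hc, ih]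
      constructor
      · rintro (h1 | h1)
        · exact Or.inl h1
        · right
          obtain ⟨sp', hsp', h2⟩ := h1
          exact ⟨sp', List.mem_cons_of_mem _ hsp', h2⟩
      · rintro (h1 | ⟨sp', hsp', h2, h3⟩)
        · exact Or.inl h1
        · rcases List.mem_cons.mp hsp' with rfl | hm
          · exact absurd h2 hc
          · exact Or.inr ⟨sp', hm, h2, h3⟩
    · rw [if_neg hc, ih]
      rw [not_not] at hc
      constructor
      · rintro (h1 | h1)
        · rcases (PySem.Dict.mem_keys_insert _ _ _ _).mp h1 with h2 | h2
          · exact Or.inr ⟨sp, List.mem_cons_self .., hc, h2⟩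
          · exact Or.inl h2
        · right
          obtain ⟨sp', hsp', h2⟩ := h1
          exact ⟨sp', List.mem_cons_of_mem _ hsp', h2⟩
      · rintro (h1 | ⟨sp', hsp', h2, h3⟩)
        · exact Or.inl ((PySem.Dict.mem_keys_insert _ _ _ _).mpr (Or.inr h1))
        · rcases List.mem_cons.mp hsp' with rfl | hm
          · exact Or.inl ((PySem.Dict.mem_keys_insert _ _ _ _).mpr (Or.inl h3))
          · exact Or.inr ⟨sp', hm, h2, h3⟩

lemma pvGStep_iff (pattern : List Char) (cbl : PySem.Dict Char (List (List Char))) (a b : Int) :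
    pvGStepRel (pvConstructGraph pattern cbl) a b ↔ pvStepR pattern cbl a b := by
  unfold pvGStepRel pvStepR
  rw [pvGraph_getD]
  by_cases ha : 0 ≤ a ∧ a < PySem.List.len pattern
  · rw [if_pos ha, pvMemRow]
    constructor
    · intro h; exact ⟨ha.1, ha.2, h⟩
    · rintro ⟨_, _, h⟩; exact h
  · rw [if_neg ha, PySem.Dict.getD_insert]
    constructor
    · intro h
      by_cases he : a = PySem.List.len pattern
      · rw [if_pos he] at h
        simp [PySem.Dict.keys_empty] at h
      · rw [if_neg he] at h
        simp [PySem.Dict.getD_empty, PySem.Dict.keys_empty] at h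
    · rintro ⟨h1, h2, _⟩
      exact absurd ⟨h1, h2⟩ ha

-- == facts about the semantic step ==
lemma pvMatch_le (pattern sp : List Char) (i : Int) (hi : 0 ≤ i) (hsp : sp ≠ [])
    (h : PySem.List.slice pattern (some i) (some (i + PySem.List.len sp)) = sp) :
    i + PySem.List.len sp ≤ PySem.List.len pattern := by
  have hpos : 0 < sp.length := List.length_pos_iff.mpr hsp
  have h0 : (0 : Int) ≤ i + PySem.List.len sp := by
    rw [PySem.List.len_eq]; omega
  have hl := congrArg List.length h
  rw [PySem.List.slice_toNat pattern hi h0] at hl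
  simp only [List.length_take, List.length_drop] at hl
  obtain ⟨ni, rfl⟩ := Int.eq_ofNat_of_zero_le hi
  simp only [PySem.List.len_eq] at hl ⊢
  have hcast : ((ni : Int) + (sp.length : Int)) = ((ni + sp.length : Nat) : Int) := by
    push_cast; ring
  rw [hcast, Int.toNat_natCast, Int.toNat_natCast] at hl
  have h2 : sp.length ≤ pattern.length - ni := by
    rw [← hl]; exact min_le_right _ _
  have h3 : 1 ≤ pattern.length - ni := by omega
  push_cast
  omega

lemma pvStep_lt (pattern : List Char) (cbl : PySem.Dict Char (List (List Char)))
    (hne : ∀ ch sp, sp ∈ cbl.getD ch [] → sp ≠ []) (a b : Int)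
    (h : pvStepR pattern cbl a b) : a < b ∧ b ≤ PySem.List.len pattern := by
  obtain ⟨ha0, han, sp, hsp, hslice, rfl⟩ := h
  have hnz : sp ≠ [] := hne _ sp hsp
  have hlen : 0 < sp.length := List.length_pos_iff.mpr hnz
  constructor
  · rw [PySem.List.len_eq]; omega
  · exact pvMatch_le pattern sp a ha0 (hne _ sp hsp) hslice

-- == DP characterization ==
def pvStepLt (pattern : List Char) (cbl : PySem.Dict Char (List (List Char))) (k : Int)
    (a b : Int) : Prop :=
  pvStepR pattern cbl a b ∧ a < k

lemma pvRTG_zero (pattern : List Char) (cbl : PySem.Dict Char (List (List Char))) (j : Int) :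
    Relation.ReflTransGen (pvStepLt pattern cbl 0) 0 j ↔ j = 0 := by
  constructor
  · intro h
    rcases (Relation.ReflTransGen.cases_head h) with h1 | ⟨c, ⟨hs, hlt⟩, _⟩
    · exact h1.symm
    · exact absurd hlt (by have := hs.1; omega)
  · rintro rfl; exact Relation.ReflTransGen.refl

lemma pvRTG_mono (pattern : List Char) (cbl : PySem.Dict Char (List (List Char)))
    {k k' : Int} (hk : k ≤ k') {x y : Int}
    (h : Relation.ReflTransGen (pvStepLt pattern cbl k) x y) :
    Relation.ReflTransGen (pvStepLt pattern cbl k') x y :=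
  h.mono (fun _ _ hab => ⟨hab.1, lt_of_lt_of_le hab.2 hk⟩)

lemma pvRTG_dichotomy (pattern : List Char) (cbl : PySem.Dict Char (List (List Char)))
    (hne : ∀ ch sp, sp ∈ cbl.getD ch [] → sp ≠ []) (k : Int) (j : Int)
    (h : Relation.ReflTransGen (pvStepLt pattern cbl (k + 1)) 0 j) :
    Relation.ReflTransGen (pvStepLt pattern cbl k) 0 j ∨
      (pvStepR pattern cbl k j ∧ Relation.ReflTransGen (pvStepLt pattern cbl k) 0 k) := by
  induction h with
  | refl => exact Or.inl Relation.ReflTransGen.refl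
  | tail h1 h2 ih =>
    rename_i c j'
    obtain ⟨hstep, hlt⟩ := h2
    rcases ih with ihl | ⟨ihs, ihk⟩
    · rcases eq_or_lt_of_le (by omega : c ≤ k) with rfl | hck
      · exact Or.inr ⟨hstep, ihl⟩
      · exact Or.inl (ihl.tail ⟨hstep, hck⟩)
    · have hkc := (pvStep_lt pattern cbl hne k c ihs).1
      have hcj := (pvStep_lt pattern cbl hne c j' ⟨hstep.1, hstep.2.1, hstep.2.2⟩).1
      omega

lemma pvGetSet (r : List Bool) (t j : Int) (ht : 0 ≤ t) (htl : t.toNat < r.length)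
    (hj : 0 ≤ j) :
    PySem.List.pyGetD (PySem.List.pySetD r t true) j false =
      if j = t then true else PySem.List.pyGetD r j false := by
  rw [PySem.List.pySetD_of_nonneg _ _ ht, PySem.List.pyGetD_of_nonneg _ _ hj,
    PySem.List.pyGetD_of_nonneg _ _ hj]
  rcases eq_or_ne j t with rfl | hne
  · rw [if_pos rfl]
    simp [List.getD_eq_getElem?_getD, List.getElem?_set, htl]
  · rw [if_neg hne]
    have hnn : t.toNat ≠ j.toNat := by omega
    simp [List.getD_eq_getElem?_getD, List.getElem?_set, hnn]

lemma pvGetReplicate (n : Nat) (j : Int) (hj : 0 ≤ j) :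
    PySem.List.pyGetD (List.replicate n false) j false = false := by
  rw [PySem.List.pyGetD_of_nonneg _ _ hj]
  simp [List.getD_eq_getElem?_getD, List.getElem?_replicate]
  split_ifs <;> rfl

lemma pvInnerLen (pattern : List Char) (i : Int) (l : List (List Char)) :
    ∀ (r : List Bool),
    (l.foldl
      (fun r2 strip =>
        if PySem.List.slice pattern (some i) (some (i + PySem.List.len strip)) = strip
        then PySem.List.pySetD r2 (i + PySem.List.len strip) true
        else r2) r).length = r.length := by
  induction l with
  | nil => intro r; rfl
  | cons sp t ih =>
    intro r
    simp only [List.foldl_cons]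
    rw [ih]
    split_ifs
    · rw [PySem.List.length_pySetD]
    · rfl

lemma pvDpInner (pattern : List Char) (cbl : PySem.Dict Char (List (List Char)))
    (i : Int) (hi0 : 0 ≤ i) (l : List (List Char)) :
    ∀ (r : List Bool), r.length = pattern.length + 1 →
    ∀ (j : Int), 0 ≤ j → (∀ sp ∈ l, sp ≠ []) →
    (PySem.List.pyGetD
      (l.foldl
        (fun r2 strip =>
          if PySem.List.slice pattern (some i) (some (i + PySem.List.len strip)) = strip
          then PySem.List.pySetD r2 (i + PySem.List.len strip) true
          else r2) r)
      j false = true ↔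
    (PySem.List.pyGetD r j false = true ∨
      ∃ sp ∈ l,
        PySem.List.slice pattern (some i) (some (i + PySem.List.len sp)) = sp ∧
        j = i + PySem.List.len sp)) := by
  induction l with
  | nil => intro r _ j _ _; simp
  | cons sp t ih =>
    intro r hr j hj hlne
    have htne : ∀ sp' ∈ t, sp' ≠ [] := fun sp' hsp' => hlne sp' (List.mem_cons_of_mem _ hsp')
    simp only [List.foldl_cons]
    by_cases hc : PySem.List.slice pattern (some i) (some (i + PySem.List.len sp)) = sp
    · rw [if_pos hc]
      have hle := pvMatch_le pattern sp i hi0 (hlne sp (List.mem_cons_self ..)) hc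
      have ht0 : (0 : Int) ≤ i + PySem.List.len sp := by
        simp only [PySem.List.len_eq]; omega
      have htl : (i + PySem.List.len sp).toNat < r.length := by
        simp only [PySem.List.len_eq] at hle ht0 ⊢
        rw [hr]
        omega
      rw [ih _ (by rw [PySem.List.length_pySetD]; exact hr) j hj htne]
      rw [pvGetSet r _ j ht0 htl hj]
      by_cases hjt : j = i + PySem.List.len sp
      · rw [if_pos hjt]
        simp only [true_or, true_iff]
        exact Or.inr ⟨sp, List.mem_cons_self .., hc, hjt⟩
      · rw [if_neg hjt]
        constructor
        · rintro (h1 | ⟨sp', hm, h2⟩)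
          · exact Or.inl h1
          · exact Or.inr ⟨sp', List.mem_cons_of_mem _ hm, h2⟩
        · rintro (h1 | ⟨sp', hm, h2, h3⟩)
          · exact Or.inl h1
          · rcases List.mem_cons.mp hm with rfl | hm2
            · exact absurd h3 hjt
            · exact Or.inr ⟨sp', hm2, h2, h3⟩
    · rw [if_neg hc, ih _ hr j hj htne]
      constructor
      · rintro (h1 | ⟨sp', hm, h2⟩)
        · exact Or.inl h1
        · exact Or.inr ⟨sp', List.mem_cons_of_mem _ hm, h2⟩
      · rintro (h1 | ⟨sp', hm, h2, h3⟩)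
        · exact Or.inl h1
        · rcases List.mem_cons.mp hm with rfl | hm2
          · exact absurd h2 hc
          · exact Or.inr ⟨sp', hm2, h2, h3⟩

lemma pvDp_len (pattern : List Char) (cbl : PySem.Dict Char (List (List Char))) (k : Nat) :
    ((PySem.List.pyRange 0 (k : Int) 1).foldl
      (fun r i =>
        if PySem.List.pyGetD r i false then
          (cbl.getD (PySem.List.pyGetD pattern i ' ') []).foldl
            (fun r2 strip =>
              if PySem.List.slice pattern (some i) (some (i + PySem.List.len strip)) = strip
              then PySem.List.pySetD r2 (i + PySem.List.len strip) true
              else r2) r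
        else r)
      (PySem.List.pySetD (List.replicate (pattern.length + 1) false) 0 true)).length
    = pattern.length + 1 := by
  induction k with
  | zero =>
    rw [PySem.List.pyRange_one_eq_nil (by omega)]
    simp [PySem.List.length_pySetD]
  | succ k ih =>
    have hcast : ((k + 1 : Nat) : Int) = (k : Int) + 1 := by push_cast; ring
    rw [hcast, PySem.List.pyRange_one_succ_right (by positivity), List.foldl_append,
      List.foldl_cons, List.foldl_nil]
    split_ifs
    · rw [pvInnerLen]; exact ih
    · exact ih

lemma pvDp_main (pattern : List Char) (cbl : PySem.Dict Char (List (List Char)))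
    (hne : ∀ ch sp, sp ∈ cbl.getD ch [] → sp ≠ []) (k : Nat)
    (hk : k ≤ pattern.length) :
    ∀ j : Int, 0 ≤ j → j ≤ PySem.List.len pattern →
      (PySem.List.pyGetD
        ((PySem.List.pyRange 0 (k : Int) 1).foldl
          (fun r i =>
            if PySem.List.pyGetD r i false then
              (cbl.getD (PySem.List.pyGetD pattern i ' ') []).foldl
                (fun r2 strip =>
                  if PySem.List.slice pattern (some i) (some (i + PySem.List.len strip)) = strip
                  then PySem.List.pySetD r2 (i + PySem.List.len strip) true
                  else r2) r
            else r)
          (PySem.List.pySetD (List.replicate (pattern.length + 1) false) 0 true))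
        j false = true
      ↔ Relation.ReflTransGen (pvStepLt pattern cbl (k : Int)) 0 j) := by
  induction k with
  | zero =>
    intro j hj0 hjn
    rw [PySem.List.pyRange_one_eq_nil (by omega)]
    simp only [List.foldl_nil, Nat.cast_zero]
    rw [pvGetSet _ 0 j (by omega) (by simp) hj0, pvRTG_zero]
    split_ifs with h
    · simp [h]
    · rw [pvGetReplicate _ j hj0]
      simp [h]
  | succ k ih =>
    intro j hj0 hjn
    have hk' : k ≤ pattern.length := by omega
    have hkn : (k : Int) < PySem.List.len pattern := by
      rw [PySem.List.len_eq]; exact_mod_cast Nat.lt_of_lt_of_le (Nat.lt_succ_self k) hk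
    have hcast : ((k + 1 : Nat) : Int) = (k : Int) + 1 := by push_cast; ring
    rw [hcast, PySem.List.pyRange_one_succ_right (by positivity), List.foldl_append,
      List.foldl_cons, List.foldl_nil]
    have ihj := ih hk'
    have hlen := pvDp_len pattern cbl k
    by_cases hk0 : Relation.ReflTransGen (pvStepLt pattern cbl (k : Int)) 0 (k : Int)
    · have hcond := (ihj (k : Int) (by positivity) (le_of_lt hkn)).mpr hk0
      rw [if_pos hcond]
      rw [pvDpInner pattern cbl (k : Int) (by positivity) _ _ hlen j hj0
        (fun sp hsp => hne _ sp hsp)]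
      rw [ihj j hj0 hjn]
      constructor
      · rintro (h1 | ⟨sp, hm, h2, h3⟩)
        · exact pvRTG_mono pattern cbl (by omega) h1
        · have hstep : pvStepR pattern cbl (k : Int) j :=
            ⟨by positivity, hkn, sp, hm, h2, h3⟩
          exact (pvRTG_mono pattern cbl (by omega) hk0).tail ⟨hstep, by omega⟩
      · intro h1
        rcases pvRTG_dichotomy pattern cbl hne (k : Int) j h1 with h2 | ⟨h2, _⟩
        · exact Or.inl h2
        · obtain ⟨_, _, sp, hm, hs2, hs3⟩ := h2
          exact Or.inr ⟨sp, hm, hs2, hs3⟩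
    · have hcond : ¬ (PySem.List.pyGetD
          ((PySem.List.pyRange 0 ((k : Nat) : Int) 1).foldl
            (fun r i =>
              if PySem.List.pyGetD r i false then
                (cbl.getD (PySem.List.pyGetD pattern i ' ') []).foldl
                  (fun r2 strip =>
                    if PySem.List.slice pattern (some i)
                        (some (i + PySem.List.len strip)) = strip
                    then PySem.List.pySetD r2 (i + PySem.List.len strip) true
                    else r2) r
              else r)
            (PySem.List.pySetD (List.replicate (pattern.length + 1) false) 0 true))
          ((k : Nat) : Int) false = true) := by
        intro hcontra
        exact hk0 ((ihj (k : Int) (by positivity) (le_of_lt hkn)).mp hcontra)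
      rw [if_neg hcond]
      rw [ihj j hj0 hjn]
      constructor
      · intro h1; exact pvRTG_mono pattern cbl (by omega) h1
      · intro h1
        rcases pvRTG_dichotomy pattern cbl hne (k : Int) j h1 with h2 | ⟨_, h3⟩
        · exact h2
        · exact absurd h3 hk0

lemma pvPattern_eq (pattern : List Char) (cbl : PySem.Dict Char (List (List Char)))
    (hne : ∀ ch sp, sp ∈ cbl.getD ch [] → sp ≠ []) :
    pvHasPath (pvConstructGraph pattern cbl) 0 (PySem.List.len pattern) =
      PySem.List.pyGetD
        ((PySem.List.pyRange 0 (PySem.List.len pattern) 1).foldl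
          (fun r i =>
            if PySem.List.pyGetD r i false then
              (cbl.getD (PySem.List.pyGetD pattern i ' ') []).foldl
                (fun r2 strip =>
                  if PySem.List.slice pattern (some i) (some (i + PySem.List.len strip)) = strip
                  then PySem.List.pySetD r2 (i + PySem.List.len strip) true
                  else r2) r
            else r)
          (PySem.List.pySetD (List.replicate (pattern.length + 1) false) 0 true))
        (PySem.List.len pattern) false := by
  rw [Bool.eq_iff_iff]
  rw [pvHasPath_iff]
  have hlen : PySem.List.len pattern = ((pattern.length : Nat) : Int) := PySem.List.len_eq pattern
  rw [hlen]
  rw [pvDp_main pattern cbl hne pattern.length (le_refl _) ((pattern.length : Nat) : Int)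
    (by positivity) (by rw [PySem.List.len_eq])]
  constructor
  · intro h
    have h2 : Relation.ReflTransGen (pvStepR pattern cbl) 0 ((pattern.length : Nat) : Int) :=
      h.mono (fun a b hab => (pvGStep_iff pattern cbl a b).mp hab)
    refine h2.mono (fun a b hab => ⟨hab, ?_⟩)
    have := hab.2.1
    rw [PySem.List.len_eq] at this
    exact this
  · intro h
    exact h.mono (fun a b hab => (pvGStep_iff pattern cbl a b).mpr hab.1)

lemma pvCbl_mem (colors : List (List Char)) (ch : Char) (sp : List Char)
    (h : sp ∈ (pvColorsByLetter colors).getD ch []) : sp ∈ colors := by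
  have h3 : ((colors.map (fun c => (PySem.List.pyGetD c 0 ' ', c))).foldl
      (fun d p => d.modify p.1 [] (fun l => l ++ [p.2])) PySem.Dict.empty)
      = colors.foldl
        (fun d color => d.modify (PySem.List.pyGetD color 0 ' ') [] (fun l => l ++ [color]))
        PySem.Dict.empty := by
    rw [List.foldl_map]
  unfold pvColorsByLetter at h
  rw [← h3, PySem.Dict.getD_foldl_modify_append] at h
  simp only [PySem.Dict.getD_empty, List.nil_append, List.mem_map, List.mem_filter] at h
  obtain ⟨p, ⟨hp1, _⟩, hp2⟩ := h
  obtain ⟨c, hc, hpc⟩ := hp1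
  rw [← hpc] at hp2
  simp only at hp2
  exact hp2 ▸ hc

-- ===== VERDICT (by name: the statement is the Claim_ definition above) =====
theorem compute_spec : Claim_equal_compute := by
  intro s _hdom hpre
  unfold Spec_compute compute compute_alt
  obtain ⟨-, hcol⟩ := hpre
  apply PySem.List.foldl_congr_mem
  intro acc pattern hmem
  have hne : ∀ ch sp,
      sp ∈ (pvColorsByLetter (PySem.Chars.splitOn
        (PySem.List.pyGetD ((PySem.Str.splitlines s).map String.toList) 0 []) [',', ' '])).getD
        ch []
      → sp ≠ [] := by
    intro ch sp hsp
    exact hcol sp (pvCbl_mem _ ch sp hsp)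
  rw [pvPattern_eq pattern _ hne]
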